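-- pv_equiv track=rewrite | github.com/Nahor-Nehc/Calculator-v2 | rpn.py | clean_brackets
-- ===== SOURCE A (Python) =====
-- def clean_brackets(expression:str):
--     while True:
--         pre_replace = expression
--         replaced = expression.replace("( ", "(").replace(" )", ")").replace("  ", " ")
--         if replaced == pre_replace:
--             return replaced
--         else:
--             expression = replaced
-- ===== SOURCE B (Python) =====
-- def clean_brackets(expression: str):
--     out = []
--     for ch in expression:
--         if ch == ' ':
--             if not out or out[-1] not in ' (':
--                 out.append(ch)
--         elif ch == ')':
--             if out and out[-1] == ' ':
--                 out.pop()
--             out.append(ch)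
--         else:
--             out.append(ch)
--     return ''.join(out)
-- ===== Notes on version B (the rewrite author's own statement) =====
-- stated objective: alternative
-- what changed: Replaces the iterate-three-replaces-until-fixpoint loop by a single left-to-right pass over the characters that collapses space runs and drops spaces adjacent to brackets using the last emitted character.
import Mathlib
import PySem

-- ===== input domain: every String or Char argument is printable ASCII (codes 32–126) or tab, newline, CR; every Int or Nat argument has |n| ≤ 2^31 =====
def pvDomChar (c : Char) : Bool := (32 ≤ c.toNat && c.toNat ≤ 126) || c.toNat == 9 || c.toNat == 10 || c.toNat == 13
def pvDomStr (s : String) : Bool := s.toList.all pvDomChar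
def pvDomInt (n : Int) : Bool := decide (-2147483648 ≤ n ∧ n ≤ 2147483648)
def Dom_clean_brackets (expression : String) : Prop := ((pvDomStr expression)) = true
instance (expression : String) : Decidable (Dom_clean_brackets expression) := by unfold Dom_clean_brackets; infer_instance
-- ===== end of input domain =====

-- B replaces A's iterate-replaces-to-fixpoint loop by a single left-to-right pass that collapses space runs and drops spaces adjacent to brackets (an alternative single-pass algorithm; not measured faster).

-- recursive form of Python's s.replace([x,y] -> [z]) (two-char pattern, one-char replacement);
-- needed above the ports only to state/prove the termination lemma A's port cites.
def repl2 (x y z : Char) : List Char → List Char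
  | [] => []
  | [c] => [c]
  | c :: d :: t => if c = x ∧ d = y then z :: repl2 x y z t else c :: repl2 x y z (d :: t)

theorem repl2_length_le (x y z : Char) (l : List Char) : (repl2 x y z l).length ≤ l.length := by
  induction l using repl2.induct x y with
  | case1 => simp [repl2]
  | case2 => simp [repl2]
  | case3 c d t h ih => simp only [repl2, if_pos h, List.length_cons]; omega
  | case4 c d t h ih => simp only [repl2, if_neg h, List.length_cons] at ih ⊢; omega

theorem go_spec (x y z : Char) (fuel : Nat) (l acc : List Char) (h : l.length ≤ fuel) :
    PySem.Chars.replace.go [x, y] [z] fuel l acc = acc.reverse ++ repl2 x y z l := by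
  induction fuel generalizing l acc with
  | zero =>
    have : l = [] := List.eq_nil_of_length_eq_zero (Nat.le_zero.mp h)
    subst this; simp [PySem.Chars.replace.go, repl2]
  | succ n ih =>
    cases l with
    | nil => simp [PySem.Chars.replace.go, repl2]
    | cons c t =>
      cases t with
      | nil =>
        rw [PySem.Chars.replace.go]
        have hpf : [x, y].isPrefixOf [c] = false := by simp [List.isPrefixOf]
        rw [hpf, if_neg Bool.false_ne_true]
        rw [ih [] (c :: acc) (by simp)]
        simp [repl2]
      | cons d t' =>
        rw [PySem.Chars.replace.go]
        by_cases hxy : c = x ∧ d = y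
        · have hpf : [x, y].isPrefixOf (c :: d :: t') = true := by
            simp [List.isPrefixOf, hxy.1, hxy.2]
          rw [hpf, if_pos rfl]
          rw [show List.drop [x,y].length (c :: d :: t') = t' from rfl]
          rw [ih t' ([z].reverse ++ acc) (by simp at h ⊢; omega)]
          simp [repl2, hxy]
        · have hpf : [x, y].isPrefixOf (c :: d :: t') = false := by
            simp [List.isPrefixOf]
            intro h1 h2; exact hxy ⟨h1.symm, h2.symm⟩
          rw [hpf, if_neg Bool.false_ne_true]
          rw [ih (d :: t') (c :: acc) (by simp at h ⊢; omega)]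
          simp [repl2, hxy]

theorem replace_eq_repl2 (x y z : Char) (l : List Char) :
    PySem.Chars.replace l [x, y] [z] = repl2 x y z l := by
  rw [PySem.Chars.replace]
  rw [if_neg (by simp)]
  exact go_spec x y z l.length l [] le_rfl

theorem repl2_eq_of_length (x y z : Char) (l : List Char)
    (h : (repl2 x y z l).length = l.length) : repl2 x y z l = l := by
  induction l using repl2.induct x y with
  | case1 => rfl
  | case2 => rfl
  | case3 c d t hcd ih =>
    exfalso
    have := repl2_length_le x y z t
    simp only [repl2, if_pos hcd, List.length_cons] at h
    omega
  | case4 c d t hcd ih =>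
    simp only [repl2, if_neg hcd, List.length_cons] at h ⊢
    rw [ih (by simp only [List.length_cons]; omega)]

-- one iteration of A's loop body, on char lists
def stepL (cs : List Char) : List Char :=
  repl2 ' ' ' ' ' ' (repl2 ' ' ')' ')' (repl2 '(' ' ' '(' cs))

theorem step_toList (e : String) :
    (PySem.Str.replace (PySem.Str.replace (PySem.Str.replace e "( " "(") " )" ")") "  " " ").toList
      = stepL e.toList := by
  simp only [PySem.Str.toList_replace, stepL]
  rw [show ("( " : String).toList = ['(', ' '] from rfl,
      show ("(" : String).toList = ['('] from rfl,
      show (" )" : String).toList = [' ', ')'] from rfl,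
      show (")" : String).toList = [')'] from rfl,
      show ("  " : String).toList = [' ', ' '] from rfl,
      show (" " : String).toList = [' '] from rfl]
  rw [replace_eq_repl2, replace_eq_repl2, replace_eq_repl2]

theorem stepL_length_le (cs : List Char) : (stepL cs).length ≤ cs.length :=
  le_trans (repl2_length_le _ _ _ _) (le_trans (repl2_length_le _ _ _ _) (repl2_length_le _ _ _ _))

theorem stepL_eq_of_length (cs : List Char) (h : (stepL cs).length = cs.length) :
    stepL cs = cs := by
  have l1 := repl2_length_le '(' ' ' '(' cs
  have l2 := repl2_length_le ' ' ')' ')' (repl2 '(' ' ' '(' cs)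
  have l3 := repl2_length_le ' ' ' ' ' ' (repl2 ' ' ')' ')' (repl2 '(' ' ' '(' cs))
  simp only [stepL] at h ⊢
  have e1 : repl2 '(' ' ' '(' cs = cs := repl2_eq_of_length _ _ _ _ (by omega)
  rw [e1] at l2 l3 h ⊢
  have e2 : repl2 ' ' ')' ')' cs = cs := repl2_eq_of_length _ _ _ _ (by omega)
  rw [e2] at l3 h ⊢
  exact repl2_eq_of_length _ _ _ _ (by omega)

theorem step_lt (e : String)
    (h : PySem.Str.replace (PySem.Str.replace (PySem.Str.replace e "( " "(") " )" ")") "  " " " ≠ e) :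
    (PySem.Str.replace (PySem.Str.replace (PySem.Str.replace e "( " "(") " )" ")") "  " " ").toList.length
      < e.toList.length := by
  have ht := step_toList e
  have hle := stepL_length_le e.toList
  rw [ht]
  by_cases heq : (stepL e.toList).length = e.toList.length
  · exfalso
    apply h
    apply String.toList_inj.mp
    exact ht.trans (stepL_eq_of_length _ heq)
  · omega

-- ===== PORT A =====
def clean_brackets (expression : String) : String :=
  let replaced := PySem.Str.replace (PySem.Str.replace (PySem.Str.replace expression "( " "(") " )" ")") "  " " "
  if h : replaced = expression then replaced  -- h used by decreasing_by below
  else clean_brackets replaced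
termination_by expression.toList.length
decreasing_by exact step_lt expression h

-- ===== PORT B =====
-- one loop-body step of B: out is the result list built so far (python appends/pops at the end)
def stepApp (out : List Char) (ch : Char) : List Char :=
  if ch = ' ' then
    match out.getLast? with
    | none => out ++ [ch]
    | some a => if a = ' ' ∨ a = '(' then out else out ++ [ch]
  else if ch = ')' then
    (if out.getLast? = some ' ' then out.dropLast else out) ++ [ch]
  else out ++ [ch]

def clean_brackets_alt (expression : String) : String :=
  String.ofList (expression.toList.foldl stepApp [])  -- ''.join(out)

-- ===== PRECONDITION & SPEC =====
def Spec_clean_brackets (expression : String) (out : String) : Prop := out = clean_brackets_alt expression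
instance (expression : String) (out : String) : Decidable (Spec_clean_brackets expression out) := by unfold Spec_clean_brackets; infer_instance

-- ===== CLAIM (what is proved, stated in full; the proofs are below) =====
def Claim_equal_clean_brackets : Prop := ∀ (expression : String), Dom_clean_brackets expression → Spec_clean_brackets expression (clean_brackets expression)

-- ===== LEMMAS AND PROOFS =====

-- reversed-accumulator version of stepApp (cons instead of append), for the proofs
def stepR (out : List Char) (ch : Char) : List Char :=
  if ch = ' ' then
    match out with
    | [] => [ch]
    | a :: _ => if a = ' ' ∨ a = '(' then out else ch :: out
  else if ch = ')' then
    match out with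
    | a :: r => if a = ' ' then ch :: r else ch :: out
    | [] => ch :: out
  else ch :: out

theorem stepApp_eq (out : List Char) (ch : Char) :
    stepApp out ch = (stepR out.reverse ch).reverse := by
  rcases h : out.reverse with _ | ⟨a, r⟩
  · have hout : out = [] := by simpa using congrArg List.reverse h
    subst hout
    simp only [stepApp, stepR, List.getLast?_nil]
    split_ifs <;> simp
  · have hout : out = r.reverse ++ [a] := by
      have := congrArg List.reverse h
      simpa using this
    rw [hout]
    simp only [stepApp, stepR, List.getLast?_concat, List.dropLast_concat]
    by_cases h1 : ch = ' '
    · simp only [if_pos h1]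
      by_cases h2 : a = ' ' ∨ a = '('
      · simp [h2]
      · simp [h2]
    · by_cases h2 : ch = ')'
      · simp only [if_neg h1, if_pos h2]
        by_cases h3 : a = ' '
        · simp [h3]
        · simp [h3]
      · simp [if_neg h1, if_neg h2]

theorem foldl_app_eq (cs : List Char) (out : List Char) :
    cs.foldl stepApp out = (cs.foldl stepR out.reverse).reverse := by
  induction cs generalizing out with
  | nil => simp
  | cons c t ih =>
    simp only [List.foldl_cons]
    rw [ih (stepApp out c), stepApp_eq, List.reverse_reverse]

-- pointwise absorption facts
theorem sp_op (acc : List Char) : stepR (stepR acc '(') ' ' = stepR acc '(' := by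
  simp [stepR]

theorem sp_rp (acc : List Char) : stepR (stepR acc ' ') ')' = stepR acc ')' := by
  rcases acc with _ | ⟨a, r⟩
  · rfl
  · by_cases h1 : a = ' '
    · subst h1; simp [stepR]
    · by_cases h2 : a = '('
      · subst h2; simp [stepR]
      · simp [stepR, h1, h2]

theorem sp_sp (acc : List Char) : stepR (stepR acc ' ') ' ' = stepR acc ' ' := by
  rcases acc with _ | ⟨a, r⟩
  · rfl
  · by_cases h1 : a = ' '
    · subst h1; simp [stepR]
    · by_cases h2 : a = '('
      · subst h2; simp [stepR]
      · simp [stepR, h1, h2]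

-- B's fold is invariant under each of A's three rewrites
theorem inv1 (cs : List Char) : ∀ acc, (repl2 '(' ' ' '(' cs).foldl stepR acc = cs.foldl stepR acc := by
  induction cs using repl2.induct '(' ' ' with
  | case1 => intro _; rfl
  | case2 c => intro _; rfl
  | case3 c d t h ih =>
    obtain ⟨rfl, rfl⟩ := h
    intro acc
    have e : repl2 '(' ' ' '(' ('(' :: ' ' :: t) = '(' :: repl2 '(' ' ' '(' t := by simp [repl2]
    rw [e, List.foldl_cons, List.foldl_cons, List.foldl_cons, ih, sp_op]
  | case4 c d t h ih =>
    intro acc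
    simp only [repl2, if_neg h, List.foldl_cons]
    exact ih _

theorem inv2 (cs : List Char) : ∀ acc, (repl2 ' ' ')' ')' cs).foldl stepR acc = cs.foldl stepR acc := by
  induction cs using repl2.induct ' ' ')' with
  | case1 => intro _; rfl
  | case2 c => intro _; rfl
  | case3 c d t h ih =>
    obtain ⟨rfl, rfl⟩ := h
    intro acc
    have e : repl2 ' ' ')' ')' (' ' :: ')' :: t) = ')' :: repl2 ' ' ')' ')' t := by simp [repl2]
    rw [e, List.foldl_cons, List.foldl_cons, List.foldl_cons, ih, sp_rp]
  | case4 c d t h ih =>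
    intro acc
    simp only [repl2, if_neg h, List.foldl_cons]
    exact ih _

theorem inv3 (cs : List Char) : ∀ acc, (repl2 ' ' ' ' ' ' cs).foldl stepR acc = cs.foldl stepR acc := by
  induction cs using repl2.induct ' ' ' ' with
  | case1 => intro _; rfl
  | case2 c => intro _; rfl
  | case3 c d t h ih =>
    obtain ⟨rfl, rfl⟩ := h
    intro acc
    have e : repl2 ' ' ' ' ' ' (' ' :: ' ' :: t) = ' ' :: repl2 ' ' ' ' ' ' t := by simp [repl2]
    rw [e, List.foldl_cons, List.foldl_cons, List.foldl_cons, ih, sp_sp]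
  | case4 c d t h ih =>
    intro acc
    simp only [repl2, if_neg h, List.foldl_cons]
    exact ih _

theorem repl2_cons_id (x y z c : Char) (t : List Char)
    (h : repl2 x y z (c :: t) = c :: t) :
    repl2 x y z t = t ∧ ¬(c = x ∧ t.head? = some y) := by
  cases t with
  | nil => exact ⟨rfl, by simp⟩
  | cons d t' =>
    by_cases hcd : c = x ∧ d = y
    · exfalso
      have hl := repl2_length_le x y z t'
      simp only [repl2, if_pos hcd] at h
      have := congrArg List.length h
      simp at this; omega
    · simp only [repl2, if_neg hcd] at h
      refine ⟨by injection h, ?_⟩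
      simp only [List.head?_cons, Option.some.injEq]
      intro ⟨h1, h2⟩; exact hcd ⟨h1, h2⟩

-- on a normal (fixpoint) string B's fold just reverses, given a compatible accumulator
theorem normB (cs : List Char) : ∀ acc : List Char,
    repl2 '(' ' ' '(' cs = cs → repl2 ' ' ')' ')' cs = cs → repl2 ' ' ' ' ' ' cs = cs →
    (cs.head? = some ' ' → acc = [] ∨ ∃ a r, acc = a :: r ∧ a ≠ ' ' ∧ a ≠ '(') →
    (cs.head? = some ')' → acc.head? ≠ some ' ') →
    cs.foldl stepR acc = cs.reverse ++ acc := by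
  induction cs with
  | nil => intro acc _ _ _ _ _; simp
  | cons c t ih =>
    intro acc h1 h2 h3 h4 h5
    obtain ⟨h1t, h1f⟩ := repl2_cons_id _ _ _ _ _ h1
    obtain ⟨h2t, h2f⟩ := repl2_cons_id _ _ _ _ _ h2
    obtain ⟨h3t, h3f⟩ := repl2_cons_id _ _ _ _ _ h3
    have hstep : stepR acc c = c :: acc := by
      by_cases hc1 : c = ' '
      · subst hc1
        rcases h4 rfl with rfl | ⟨a, r, rfl, ha1, ha2⟩
        · rfl
        · simp [stepR, ha1, ha2]
      · by_cases hc2 : c = ')'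
        · subst hc2
          rcases acc with _ | ⟨a, r⟩
          · rfl
          · have : a ≠ ' ' := by
              intro hh; exact h5 rfl (by simp [hh])
            simp [stepR, hc1, this]
        · simp [stepR, hc1, hc2]
    rw [List.foldl_cons, hstep]
    rw [ih (c :: acc) h1t h2t h3t ?_ ?_]
    · simp
    · intro ht
      right
      refine ⟨c, acc, rfl, ?_, ?_⟩
      · intro hh; exact h3f ⟨hh, ht⟩
      · intro hh; exact h1f ⟨hh, ht⟩
    · intro ht
      simp only [List.head?_cons, ne_eq, Option.some.injEq]
      intro hh; exact h2f ⟨hh, ht⟩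

theorem stepL_ids (cs : List Char) (h : stepL cs = cs) :
    repl2 '(' ' ' '(' cs = cs ∧ repl2 ' ' ')' ')' cs = cs ∧ repl2 ' ' ' ' ' ' cs = cs := by
  have hlen := congrArg List.length h
  have l1 := repl2_length_le '(' ' ' '(' cs
  have l2 := repl2_length_le ' ' ')' ')' (repl2 '(' ' ' '(' cs)
  have l3 := repl2_length_le ' ' ' ' ' ' (repl2 ' ' ')' ')' (repl2 '(' ' ' '(' cs))
  simp only [stepL] at hlen h ⊢
  have e1 : repl2 '(' ' ' '(' cs = cs := repl2_eq_of_length _ _ _ _ (by omega)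
  rw [e1] at l2 l3 hlen h ⊢
  have e2 : repl2 ' ' ')' ')' cs = cs := repl2_eq_of_length _ _ _ _ (by omega)
  rw [e2] at l3 hlen h ⊢
  exact ⟨rfl, rfl, h⟩

theorem alt_fixpoint (e : String)
    (h : PySem.Str.replace (PySem.Str.replace (PySem.Str.replace e "( " "(") " )" ")") "  " " " = e) :
    clean_brackets_alt e = e := by
  have hl : stepL e.toList = e.toList := by
    rw [← step_toList e, h]
  obtain ⟨e1, e2, e3⟩ := stepL_ids _ hl
  unfold clean_brackets_alt
  rw [foldl_app_eq]
  rw [show ([] : List Char).reverse = [] from rfl]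
  rw [normB e.toList [] e1 e2 e3 (fun _ => Or.inl rfl) (fun _ => by simp)]
  simp [String.ofList_toList]

theorem alt_step (e : String) :
    clean_brackets_alt (PySem.Str.replace (PySem.Str.replace (PySem.Str.replace e "( " "(") " )" ")") "  " " ")
      = clean_brackets_alt e := by
  unfold clean_brackets_alt
  rw [foldl_app_eq, foldl_app_eq]
  rw [step_toList e]
  simp only [stepL, List.reverse_nil]
  rw [inv3, inv2, inv1]

theorem main_eq (e : String) : clean_brackets e = clean_brackets_alt e := by
  have H : ∀ (n : Nat) (e : String), e.toList.length = n →
      clean_brackets e = clean_brackets_alt e := by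
    intro n
    induction n using Nat.strong_induction_on with
    | _ n ih =>
      intro e hn
      rw [clean_brackets]
      by_cases h : PySem.Str.replace (PySem.Str.replace (PySem.Str.replace e "( " "(") " )" ")") "  " " " = e
      · rw [dif_pos h, h, alt_fixpoint e h]
      · rw [dif_neg h]
        have hlt := step_lt e h
        rw [ih _ (hn ▸ hlt) _ rfl, alt_step]
  exact H _ e rfl

-- ===== VERDICT (by name: the statement is the Claim_ definition above) =====
theorem clean_brackets_spec : Claim_equal_clean_brackets := by
  intro e _
  unfold Spec_clean_brackets
  exact main_eq e
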